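-- pv_equiv track=rewrite | github.com/Sarah-OA/ensae-prog23 | delivery_network/graph.py | min_power_kruskal
-- ===== SOURCE A (Python) =====
-- def min_power_kruskal(profondeurs, parents, src, dest):
--     """ La fonction renvoie une liste représentant le chemin à emprunter pour aller de src à dest ainsi que la puissance
--     minimale nécessaire pour effectuer ce trajet."""
--     depart = [src] #chemin parcouru depuis le départ
--     arrivee = [dest] #chemin parcouru depuis l'arrivée
--     a = src # le "départ"
--     b = dest #l' "arrivée"
--     p_min = 0 #puissance minimale pour réaliser le trajet
--     while a != b: #tant que le départ et l'arrivée sont différents: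
--         if profondeurs[a]>profondeurs[b]: #si a est un noeud plus profond que b, on remonte au parent de a
--             a,p = parents[a]
--             depart.append(a) #on actualise le chemin parcouru depuis le départ
--             if p>p_min: #si la puissance nécessaire à faire ce trajet est supérieure à p_min, on l'actualise
--                 p_min = p
--         elif profondeurs[a]<profondeurs[b]: # idem si b est un noeud plus profond que a
--             b,p = parents[b]
--             arrivee = [b] + arrivee
--             if p>p_min:
--                 p_min = p
--         else: # Si les deux noeuds sont à la même profondeur, ont revient aux parents de a et de b
--             a,p1 = parents[a]
--             b,p2 = parents[b]
--             depart.append(a) #cette fois ci les deux listes contenant le début et la fin du chemin sont actualisées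
--             arrivee = [b] + arrivee
--             if max(p1, p2)>p_min: #on considère le max des puissances des trajets parcourus pour actualiser p_min
--                 p_min = max(p1, p2)
--     depart.pop()
--     return (depart + arrivee, p_min)
-- ===== SOURCE B (Python) =====
-- def min_power_kruskal(profondeurs, parents, src, dest):
--     """Chain-based re-implementation: build each endpoint's full ancestor chain
--     up to the root, locate the LCA as the first node of dest's chain that lies
--     in src's chain, then assemble the path and the max edge power by slicing."""
--     if src == dest:
--         return ([src], 0)
--
--     def chain(x):
--         nodes, pows = [x], []
--         while profondeurs[x] > 0:
--             x, p = parents[x]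
--             nodes.append(x)
--             pows.append(p)
--         return nodes, pows
--
--     s_nodes, s_pows = chain(src)
--     d_nodes, d_pows = chain(dest)
--     s_set = set(s_nodes)
--     j = next(k for k, v in enumerate(d_nodes) if v in s_set)
--     i = s_nodes.index(d_nodes[j])
--     path = s_nodes[:i + 1] + d_nodes[:j][::-1]
--     p_min = max([0] + s_pows[:i] + d_pows[:j])
--     return (path, p_min)
-- ===== Notes on version B (the rewrite author's own statement) =====
-- stated objective: alternative
-- what changed: Replaces A's interleaved two-pointer climb (repeatedly stepping the deeper of the two current nodes) by building each endpoint's full ancestor chain up to the root, finding the LCA as the first node of dest's chain contained in a set of src's chain, and assembling the path and the max edge power by slicing the two chains.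
-- outside the precondition, e.g. on min_power_kruskal({1: 5, 2: 3}, {1: (2, 7)}, 1, 2): A returns ([1, 2], 7), B raises KeyError
import Mathlib
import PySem

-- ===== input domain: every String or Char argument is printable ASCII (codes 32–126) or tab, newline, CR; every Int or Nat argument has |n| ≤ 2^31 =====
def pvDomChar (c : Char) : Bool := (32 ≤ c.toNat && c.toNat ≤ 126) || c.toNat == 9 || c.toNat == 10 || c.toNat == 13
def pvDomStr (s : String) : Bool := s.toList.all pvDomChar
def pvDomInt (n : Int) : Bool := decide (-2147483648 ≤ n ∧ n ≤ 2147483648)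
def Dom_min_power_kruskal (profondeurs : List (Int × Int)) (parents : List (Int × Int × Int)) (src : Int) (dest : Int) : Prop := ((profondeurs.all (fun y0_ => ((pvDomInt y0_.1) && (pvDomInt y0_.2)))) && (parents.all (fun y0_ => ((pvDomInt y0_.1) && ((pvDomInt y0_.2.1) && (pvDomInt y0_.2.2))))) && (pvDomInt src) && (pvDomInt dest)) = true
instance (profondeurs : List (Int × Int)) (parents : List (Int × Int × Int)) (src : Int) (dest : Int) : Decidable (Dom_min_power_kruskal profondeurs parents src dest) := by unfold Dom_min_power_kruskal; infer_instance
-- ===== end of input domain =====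

-- B replaces A's interleaved two-pointer climb by building both full ancestor chains and slicing
-- them at the LCA (first node of dest's chain inside a set of src's chain); objective: alternative.

-- ===== PORT A =====
-- dict lookups profondeurs[x] / parents[x]  (shared lookup helpers for both ports)
def pvProf (profondeurs : List (Int × Int)) (x : Int) : Option Int :=
  (PySem.Dict.mk profondeurs).get? x
def pvPar (parents : List (Int × Int × Int)) (x : Int) : Option (Int × Int) :=
  (PySem.Dict.mk parents).get? x

-- the while loop of A; fuel makes it total (under Pre_ the depth sum bounds the iterations,
-- so the fuel-out branch is never reached); `none` lookups are Python KeyErrors, excluded by Pre_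
def pvALoop (profondeurs : List (Int × Int)) (parents : List (Int × Int × Int)) :
    Nat → List Int → List Int → Int → Int → Int → List Int × Int
  | 0, depart, arrivee, _, _, p_min => (depart.dropLast ++ arrivee, p_min)
  | fuel+1, depart, arrivee, a, b, p_min =>
    if a = b then (depart.dropLast ++ arrivee, p_min)
    else
      match pvProf profondeurs a, pvProf profondeurs b with
      | some da, some db =>
        if da > db then
          match pvPar parents a with
          | some (a', p) =>
              pvALoop profondeurs parents fuel (depart ++ [a']) arrivee a' b
                (if p > p_min then p else p_min)
          | none => ([], 0)
        else if da < db then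
          match pvPar parents b with
          | some (b', p) =>
              pvALoop profondeurs parents fuel depart (b' :: arrivee) a b'
                (if p > p_min then p else p_min)
          | none => ([], 0)
        else
          match pvPar parents a, pvPar parents b with
          | some (a', p1), some (b', p2) =>
              pvALoop profondeurs parents fuel (depart ++ [a']) (b' :: arrivee) a' b'
                (if max p1 p2 > p_min then max p1 p2 else p_min)
          | _, _ => ([], 0)
      | _, _ => ([], 0)

def pvFuelA : Nat := 2^32 + 2

def min_power_kruskal (profondeurs : List (Int × Int)) (parents : List (Int × Int × Int)) (src : Int) (dest : Int) : List Int × Int :=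
  pvALoop profondeurs parents pvFuelA [src] [dest] src dest 0

-- ===== PORT B =====
-- the chain(x) helper of Source B: climbs to the root, appending nodes and edge powers;
-- fuel makes the while loop total (depth strictly decreases, so depth bounds the iterations)
def pvClimb (profondeurs : List (Int × Int)) (parents : List (Int × Int × Int)) :
    Nat → Int → List Int → List Int → List Int × List Int
  | 0, _, nodes, pows => (nodes, pows)
  | fuel+1, x, nodes, pows =>
    match pvProf profondeurs x with
    | some d =>
      if 0 < d then
        match pvPar parents x with
        | some (x', p) => pvClimb profondeurs parents fuel x' (nodes ++ [x']) (pows ++ [p])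
        | none => (nodes, pows)   -- KeyError in Python: excluded by Pre_
      else (nodes, pows)
    | none => (nodes, pows)        -- KeyError in Python: excluded by Pre_

def pvFuelB : Nat := 2^31 + 2

def min_power_kruskal_alt (profondeurs : List (Int × Int)) (parents : List (Int × Int × Int)) (src : Int) (dest : Int) : List Int × Int :=
  if src = dest then ([src], 0)
  else
    let sc := pvClimb profondeurs parents pvFuelB src [src] []
    let dc := pvClimb profondeurs parents pvFuelB dest [dest] []
    let sset : PySem.Set Int := PySem.Set.ofList sc.1
    match dc.1.findIdx? (fun v => PySem.Set.contains sset v) with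
    | none => ([], 0)              -- StopIteration in Python: excluded by Pre_
    | some j =>
      match PySem.List.index? sc.1 (dc.1.getD j 0) with
      | none => ([], 0)            -- unreachable: d_nodes[j] is in s_nodes
      | some i =>
        (sc.1.take (i+1) ++ (dc.1.take j).reverse,
         (PySem.List.max? ((0:Int) :: (sc.2.take i ++ dc.2.take j)) (fun y => y)).getD 0)

-- ===== PRECONDITION & SPEC =====
-- Pre_ admits src = dest (A returns immediately), and otherwise asks that the two dicts describe
-- a rooted tree containing src and dest: duplicate-free keys (a Python dict cannot have duplicate
-- keys anyway), every depth nonnegative, every node of positive depth having a parent of strictly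
-- smaller depth, and a unique node of depth 0.  Outside this A raises KeyError or loops forever.
def Pre_min_power_kruskal (profondeurs : List (Int × Int)) (parents : List (Int × Int × Int)) (src : Int) (dest : Int) : Prop :=
  src = dest ∨
  ((profondeurs.map Prod.fst).Nodup ∧ (parents.map Prod.fst).Nodup ∧
   (∀ q ∈ profondeurs, 0 ≤ q.2 ∧
      (0 < q.2 → ∃ r ∈ parents, r.1 = q.1 ∧ ∃ q' ∈ profondeurs, q'.1 = r.2.1 ∧ q'.2 < q.2)) ∧
   (∀ q ∈ profondeurs, ∀ r ∈ profondeurs, q.2 = 0 → r.2 = 0 → q.1 = r.1) ∧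
   (∃ q ∈ profondeurs, q.1 = src) ∧ (∃ q ∈ profondeurs, q.1 = dest))

instance (profondeurs : List (Int × Int)) (parents : List (Int × Int × Int)) (src : Int) (dest : Int) : Decidable (Pre_min_power_kruskal profondeurs parents src dest) := by unfold Pre_min_power_kruskal; infer_instance

def pvWitness_min_power_kruskal : (List (Int × Int)) × (List (Int × Int × Int)) × Int × Int :=
  ([(1,0),(2,1),(3,1)], [(2,(1,5)),(3,(1,7))], 2, 3)

def Spec_min_power_kruskal (profondeurs : List (Int × Int)) (parents : List (Int × Int × Int)) (src : Int) (dest : Int) (out : List Int × Int) : Prop := out = min_power_kruskal_alt profondeurs parents src dest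
instance (profondeurs : List (Int × Int)) (parents : List (Int × Int × Int)) (src : Int) (dest : Int) (out : List Int × Int) : Decidable (Spec_min_power_kruskal profondeurs parents src dest out) := by unfold Spec_min_power_kruskal; infer_instance

-- ===== CLAIM (what is proved, stated in full; the proofs are below) =====
def Claim_equal_min_power_kruskal : Prop := ∀ (profondeurs : List (Int × Int)) (parents : List (Int × Int × Int)) (src : Int) (dest : Int), Dom_min_power_kruskal profondeurs parents src dest → Pre_min_power_kruskal profondeurs parents src dest → Spec_min_power_kruskal profondeurs parents src dest (min_power_kruskal profondeurs parents src dest)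

-- ===== LEMMAS AND PROOFS =====

-- an ancestor chain: S lists the nodes from x up to the root, P the parallel edge powers;
-- each step records that the parent's depth strictly decreases
inductive pvChain (profondeurs : List (Int × Int)) (parents : List (Int × Int × Int)) : Int → List Int → List Int → Prop
  | root (x : Int) : pvProf profondeurs x = some 0 → pvChain profondeurs parents x [x] []
  | step (x y p d d' : Int) (S P : List Int) :
      pvProf profondeurs x = some d → 0 < d → pvPar parents x = some (y, p) →
      pvProf profondeurs y = some d' → d' < d →
      pvChain profondeurs parents y S P → pvChain profondeurs parents x (x :: S) (p :: P)

theorem pvChain_head {profondeurs : List (Int × Int)} {parents : List (Int × Int × Int)}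
    {x : Int} {S P : List Int} (h : pvChain profondeurs parents x S P) :
    ∃ t, S = x :: t := by
  cases h with
  | root _ _ => exact ⟨[], rfl⟩
  | step _ y p d d' S' P' _ _ _ _ _ _ => exact ⟨S', rfl⟩

theorem pvChain_depth {profondeurs : List (Int × Int)} {parents : List (Int × Int × Int)}
    {x : Int} {S P : List Int} (h : pvChain profondeurs parents x S P) :
    ∃ d, pvProf profondeurs x = some d ∧ 0 ≤ d := by
  cases h with
  | root _ hp => exact ⟨0, hp, le_refl _⟩
  | step _ y p d d' S' P' hp hd _ _ _ _ => exact ⟨d, hp, le_of_lt hd⟩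

-- every node strictly later in the chain has strictly smaller depth
theorem pvChain_tail_depth {profondeurs : List (Int × Int)} {parents : List (Int × Int × Int)} :
    ∀ {x : Int} {S P : List Int}, pvChain profondeurs parents x S P →
    ∀ {d0 : Int}, pvProf profondeurs x = some d0 →
    ∀ y ∈ S.tail, ∃ dy, pvProf profondeurs y = some dy ∧ dy < d0 := by
  intro x S P h
  induction h with
  | root _ _ => intro d0 _ y hy; simp at hy
  | step x z p d d' S' P' hp hd hpar hpz hlt hc ih =>
    intro d0 hp0 y hy
    rw [hp] at hp0; injection hp0 with hp0; subst hp0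
    obtain ⟨t, hS'⟩ := pvChain_head hc
    simp only [List.tail_cons] at hy
    rcases (by rw [hS'] at hy; exact List.mem_cons.1 hy) with h1 | h1
    · subst h1; exact ⟨d', hpz, hlt⟩
    · obtain ⟨dy, hdy, hdylt⟩ := ih hpz y (by rw [hS']; exact h1)
      exact ⟨dy, hdy, lt_trans hdylt hlt⟩

-- some node of the chain is a root (depth 0)
theorem pvChain_root_mem {profondeurs : List (Int × Int)} {parents : List (Int × Int × Int)} :
    ∀ {x : Int} {S P : List Int}, pvChain profondeurs parents x S P →
    ∃ r ∈ S, pvProf profondeurs r = some 0 := by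
  intro x S P h
  induction h with
  | root x hp => exact ⟨x, by simp, hp⟩
  | step x y p d d' S' P' _ _ _ _ _ _ ih =>
    obtain ⟨r, hr, hr0⟩ := ih
    exact ⟨r, by simp [hr], hr0⟩

-- chain length is bounded by the depth of its head
theorem pvChain_len {profondeurs : List (Int × Int)} {parents : List (Int × Int × Int)} :
    ∀ {x : Int} {S P : List Int}, pvChain profondeurs parents x S P →
    ∀ {d : Int}, pvProf profondeurs x = some d → S.length ≤ d.toNat + 1 := by
  intro x S P h
  induction h with
  | root x hp => intro d hd; rw [hp] at hd; injection hd with hd; subst hd; simp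
  | step x y p d d' S' P' hp hd hpar hpz hlt hc ih =>
    intro d0 hd0
    rw [hp] at hd0; injection hd0 with hd0; subst hd0
    have h1 := ih hpz
    have hnn : 0 ≤ d' := by
      obtain ⟨dz, hdz, hdznn⟩ := pvChain_depth hc
      rw [hpz] at hdz; injection hdz with hdz
      omega
    have h2 : d'.toNat < d.toNat := by omega
    simp only [List.length_cons]
    omega

-- characterisation of pvClimb: with enough fuel it appends exactly the ancestor chain
theorem pvClimb_spec {profondeurs : List (Int × Int)} {parents : List (Int × Int × Int)}
    (hG2 : ∀ x d, pvProf profondeurs x = some d → 0 < d →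
      ∃ y pw d', pvPar parents x = some (y, pw) ∧ pvProf profondeurs y = some d' ∧ d' < d)
    (hG1 : ∀ x d, pvProf profondeurs x = some d → 0 ≤ d) :
    ∀ (fuel : Nat) (x : Int) (d : Int), pvProf profondeurs x = some d → d.toNat < fuel →
    ∃ S P, pvChain profondeurs parents x (x :: S) P ∧
      ∀ ns ps, pvClimb profondeurs parents fuel x ns ps = (ns ++ S, ps ++ P) := by
  intro fuel
  induction fuel with
  | zero => intro x d _ h; omega
  | succ fuel ih =>
    intro x d hd hfuel
    by_cases hpos : 0 < d
    · obtain ⟨y, pw, d', hpar, hd', hlt⟩ := hG2 x d hd hpos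
      have hd'nn : 0 ≤ d' := hG1 y d' hd'
      obtain ⟨S', P', hch, hrec⟩ := ih y d' hd' (by omega)
      refine ⟨y :: S', pw :: P', ?_, ?_⟩
      · exact pvChain.step x y pw d d' (y :: S') P' hd hpos hpar hd' hlt hch
      · intro ns ps
        simp only [pvClimb, hd, if_pos hpos, hpar, hrec, List.append_assoc, List.cons_append,
          List.nil_append]
    · have h0 : d = 0 := le_antisymm (not_lt.1 hpos) (hG1 x d hd)
      subst h0
      refine ⟨[], [], pvChain.root x hd, ?_⟩
      intro ns ps
      simp [pvClimb, hd]

-- folding max: pulling one element out of the middle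
theorem pvFoldlMax_pull : ∀ (l : List Int) (p x : Int),
    l.foldl max (max p x) = max x (l.foldl max p) := by
  intro l
  induction l with
  | nil => intro p x; exact max_comm p x
  | cons y t ih =>
    intro p x
    simp only [List.foldl_cons]
    rw [show max (max p x) y = max (max p y) x by
      rw [max_assoc, max_assoc, max_comm x y], ih]

theorem pvFoldlMax_mid : ∀ (l1 l2 : List Int) (p x : Int),
    (l1 ++ x :: l2).foldl max p = (l1 ++ l2).foldl max (max p x) := by
  intro l1 l2 p x
  simp only [List.foldl_append, List.foldl_cons]
  rw [pvFoldlMax_pull l1 p x]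
  rw [max_comm]

-- the central lemma: A's two-pointer loop, started at chain heads a and b with the meeting
-- point c sitting at positions i (in a's chain) and j (in b's chain), produces exactly the
-- sliced chains and the running max of the edge powers on the way
theorem pvMain {profondeurs : List (Int × Int)} {parents : List (Int × Int × Int)}
    (hG3 : ∀ x y, pvProf profondeurs x = some 0 → pvProf profondeurs y = some 0 → x = y) :
    ∀ (fuel : Nat) (a b : Int) (Sa Pa Sb Pb : List Int) (i j : Nat) (c : Int),
    pvChain profondeurs parents a Sa Pa → pvChain profondeurs parents b Sb Pb →
    Sa[i]? = some c → Sb[j]? = some c →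
    (∀ k, k < j → ∀ v, Sb[k]? = some v → v ∉ Sa) →
    (∀ k, k < i → Sa[k]? ≠ some c) →
    i + j < fuel →
    ∀ dep arr p, pvALoop profondeurs parents fuel (dep ++ [a]) (b :: arr) a b p
      = (dep ++ Sa.take i ++ (Sb.take (j+1)).reverse ++ arr,
         (Pa.take i ++ Pb.take j).foldl max p) := by
  intro fuel
  induction fuel with
  | zero => intro a b Sa Pa Sb Pb i j c _ _ _ _ _ _ hfuel; omega
  | succ fuel ih =>
    intro a b Sa Pa Sb Pb i j c hCa hCb hSai hSbj hjmin himin hfuel dep arr p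
    obtain ⟨ta, hta⟩ := pvChain_head hCa
    obtain ⟨tb, htb⟩ := pvChain_head hCb
    obtain ⟨da, hda, hdann⟩ := pvChain_depth hCa
    obtain ⟨db, hdb, hdbnn⟩ := pvChain_depth hCb
    have hcSa : c ∈ Sa := by
      have := List.getElem?_eq_some_iff.1 hSai
      obtain ⟨hlt, hsa⟩ := this
      exact hsa ▸ List.getElem_mem hlt
    -- depth of c seen from each chain, when c is strictly below the head
    have hdcA : 1 ≤ i → ∃ dc, pvProf profondeurs c = some dc ∧ dc < da := by
      intro hi
      have hmem : c ∈ Sa.tail := by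
        rw [hta]
        obtain ⟨i', rfl⟩ : ∃ i', i = i' + 1 := ⟨i - 1, by omega⟩
        rw [hta, List.getElem?_cons_succ] at hSai
        have := List.getElem?_eq_some_iff.1 hSai
        obtain ⟨hlt, hsa⟩ := this
        exact hsa ▸ List.getElem_mem hlt
      exact pvChain_tail_depth hCa hda c hmem
    have hdcB : 1 ≤ j → ∃ dc, pvProf profondeurs c = some dc ∧ dc < db := by
      intro hj
      have hmem : c ∈ Sb.tail := by
        rw [htb]
        obtain ⟨j', rfl⟩ : ∃ j', j = j' + 1 := ⟨j - 1, by omega⟩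
        rw [htb, List.getElem?_cons_succ] at hSbj
        have := List.getElem?_eq_some_iff.1 hSbj
        obtain ⟨hlt, hsb⟩ := this
        exact hsb ▸ List.getElem_mem hlt
      exact pvChain_tail_depth hCb hdb c hmem
    by_cases hab : a = b
    · -- the loop terminates; i = j = 0
      have hj0 : j = 0 := by
        by_contra hj
        have h0 : Sb[0]? = some b := by rw [htb]; rfl
        exact hjmin 0 (by omega) b h0 (by rw [hta, hab]; exact List.mem_cons_self)
      have hc : c = b := by
        rw [hj0, htb] at hSbj
        injection hSbj with h; exact h.symm
      have hi0 : i = 0 := by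
        by_contra hi
        exact himin 0 (by omega) (by rw [hta]; simp [hc, hab])
      subst hi0; subst hj0
      simp only [pvALoop, if_pos hab]
      rw [hta, htb]
      simp [hab]
    · -- a ≠ b: one more loop iteration
      have hine : ¬ (i = 0 ∧ j = 0) := by
        rintro ⟨hi0, hj0⟩
        rw [hi0, hta] at hSai; rw [hj0, htb] at hSbj
        injection hSai with h1; injection hSbj with h2
        exact hab (h1.trans h2.symm)
      -- if i = 0 then c = a, so j ≥ 1 and depth c < db gives da < db
      have hi0da : i = 0 → da < db := by
        intro hi0
        have hc : c = a := by rw [hi0, hta] at hSai; injection hSai with h; exact h.symm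
        have hj1 : 1 ≤ j := by omega
        obtain ⟨dc, hdc, hlt⟩ := hdcB hj1
        rw [hc, hda] at hdc; injection hdc with h; omega
      have hj0db : j = 0 → db < da := by
        intro hj0
        have hc : c = b := by rw [hj0, htb] at hSbj; injection hSbj with h; exact h.symm
        have hi1 : 1 ≤ i := by omega
        obtain ⟨dc, hdc, hlt⟩ := hdcA hi1
        rw [hc, hdb] at hdc; injection hdc with h; omega
      rcases lt_trichotomy db da with hcmp | hcmp | hcmp
      · -- branch 1: a is deeper, move a
        have hi1 : 1 ≤ i := by
          rcases Nat.eq_zero_or_pos i with h | h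
          · exact absurd (hi0da h) (by omega)
          · omega
        have hdapos : 0 < da := by omega
        cases hCa with
        | root _ hp0 => rw [hda] at hp0; injection hp0 with h; omega
        | step _ a2 p1 d dd S' P' hp hdpos hpar hpz hltd hc2 =>
          rw [hda] at hp; injection hp with hp; subst hp
          obtain ⟨i', rfl⟩ : ∃ i', i = i' + 1 := ⟨i - 1, by omega⟩
          have hrec := ih a2 b S' P' Sb Pb i' j c hc2 hCb
            (by rw [List.getElem?_cons_succ] at hSai; exact hSai) hSbj
            (fun k hk v hv hvin => hjmin k hk v hv (List.mem_cons_of_mem _ hvin))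
            (fun k hk => by
              have := himin (k+1) (by omega)
              rwa [List.getElem?_cons_succ] at this)
            (by omega) (dep ++ [a]) arr (if p1 > p then p1 else p)
          simp only [pvALoop, if_neg hab, hda, hdb, if_pos hcmp, hpar]
          rw [show (dep ++ [a]) ++ [a2] = (dep ++ [a]) ++ [a2] from rfl]
          rw [hrec]
          refine Prod.ext ?_ ?_
          · simp [List.take_succ_cons, List.append_assoc]
          · rw [show (if p1 > p then p1 else p) = max p p1 by
              rw [max_def]; split_ifs <;> omega]
            simp [List.take_succ_cons]
      · -- equal depths: move both
        have hi1 : 1 ≤ i := by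
          rcases Nat.eq_zero_or_pos i with h | h
          · exact absurd (hi0da h) (by omega)
          · omega
        have hj1 : 1 ≤ j := by
          rcases Nat.eq_zero_or_pos j with h | h
          · exact absurd (hj0db h) (by omega)
          · omega
        have hdapos : 0 < da := by
          by_contra h
          have h0 : da = 0 := by omega
          have h0b : db = 0 := by omega
          exact hab (hG3 a b (h0 ▸ hda) (h0b ▸ hdb))
        cases hCa with
        | root _ hp0 => rw [hda] at hp0; injection hp0 with h; omega
        | step _ a2 p1 d dd S' P' hp hdpos hpar hpz hltd hc2 =>
          rw [hda] at hp; injection hp with hp; subst hp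
          cases hCb with
          | root _ hp0 => rw [hdb] at hp0; injection hp0 with h; omega
          | step _ b2 p2 d2 dd2 S2 P2 hp2 hdpos2 hpar2 hpz2 hltd2 hcb2 =>
            rw [hdb] at hp2; injection hp2 with hp2; subst hp2
            obtain ⟨i', rfl⟩ : ∃ i', i = i' + 1 := ⟨i - 1, by omega⟩
            obtain ⟨j', rfl⟩ : ∃ j', j = j' + 1 := ⟨j - 1, by omega⟩
            have hrec := ih a2 b2 S' P' S2 P2 i' j' c hc2 hcb2
              (by rw [List.getElem?_cons_succ] at hSai; exact hSai)
              (by rw [List.getElem?_cons_succ] at hSbj; exact hSbj)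
              (fun k hk v hv hvin => hjmin (k+1) (by omega) v
                (by rw [List.getElem?_cons_succ]; exact hv) (List.mem_cons_of_mem _ hvin))
              (fun k hk => by
                have := himin (k+1) (by omega)
                rwa [List.getElem?_cons_succ] at this)
              (by omega) (dep ++ [a]) (b :: arr) (if max p1 p2 > p then max p1 p2 else p)
            have hngt : ¬ (da > db) := by omega
            have hnlt : ¬ (da < db) := by omega
            simp only [pvALoop, if_neg hab, hda, hdb, if_neg hngt, if_neg hnlt, hpar, hpar2]
            rw [hrec]
            refine Prod.ext ?_ ?_
            · simp [List.take_succ_cons, List.append_assoc]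
            · rw [show (if max p1 p2 > p then max p1 p2 else p) = max p (max p1 p2) by
                generalize max p1 p2 = m; rw [max_def]; split_ifs <;> omega]
              simp only [List.take_succ_cons, List.cons_append, List.foldl_cons]
              rw [pvFoldlMax_mid, max_assoc]
      · -- branch 2: b is deeper, move b
        have hj1 : 1 ≤ j := by
          rcases Nat.eq_zero_or_pos j with h | h
          · exact absurd (hj0db h) (by omega)
          · omega
        have hdbpos : 0 < db := by omega
        cases hCb with
        | root _ hp0 => rw [hdb] at hp0; injection hp0 with h; omega
        | step _ b2 p1 d2 dd2 S2 P2 hp2 hdpos2 hpar2 hpz2 hltd2 hcb2 =>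
          rw [hdb] at hp2; injection hp2 with hp2; subst hp2
          obtain ⟨j', rfl⟩ : ∃ j', j = j' + 1 := ⟨j - 1, by omega⟩
          have hrec := ih a b2 Sa Pa S2 P2 i j' c hCa hcb2 hSai
            (by rw [List.getElem?_cons_succ] at hSbj; exact hSbj)
            (fun k hk v hv hvin => hjmin (k+1) (by omega) v
              (by rw [List.getElem?_cons_succ]; exact hv) hvin)
            himin (by omega) dep (b :: arr) (if p1 > p then p1 else p)
          have hngt : ¬ (da > db) := by omega
          simp only [pvALoop, if_neg hab, hda, hdb, if_neg hngt, if_pos hcmp, hpar2]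
          rw [hrec]
          refine Prod.ext ?_ ?_
          · simp [List.take_succ_cons, List.append_assoc]
          · rw [show (if p1 > p then p1 else p) = max p p1 by
              rw [max_def]; split_ifs <;> omega]
            simp only [List.take_succ_cons]
            rw [pvFoldlMax_mid]
  

-- bridging dict lookups with list membership, under duplicate-free keys
theorem pvProf_of_mem {profondeurs : List (Int × Int)}
    (hnd : (profondeurs.map Prod.fst).Nodup) {x d : Int} (h : (x, d) ∈ profondeurs) :
    pvProf profondeurs x = some d :=
  PySem.Dict.get?_of_mem_items _ h (by simpa [PySem.Dict.keys] using hnd)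

theorem pvProf_mem {profondeurs : List (Int × Int)} {x d : Int}
    (h : pvProf profondeurs x = some d) : (x, d) ∈ profondeurs :=
  PySem.Dict.mem_items_of_get?_eq_some _ h

theorem pvPar_of_mem {parents : List (Int × Int × Int)}
    (hnd : (parents.map Prod.fst).Nodup) {x : Int} {yp : Int × Int} (h : (x, yp) ∈ parents) :
    pvPar parents x = some yp :=
  PySem.Dict.get?_of_mem_items _ h (by simpa [PySem.Dict.keys] using hnd)

theorem pvALoop_stop (profondeurs : List (Int × Int)) (parents : List (Int × Int × Int))
    (fuel : Nat) (dep arr : List Int) (a p : Int) :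
    pvALoop profondeurs parents (fuel+1) dep arr a a p = (dep.dropLast ++ arr, p) := by
  simp [pvALoop]

-- ===== VERDICT (by name: the statement is the Claim_ definition above) =====
theorem min_power_kruskal_spec : Claim_equal_min_power_kruskal := by
  intro profondeurs parents src dest hDom hPre
  unfold Spec_min_power_kruskal
  by_cases hsd : src = dest
  · subst hsd
    show pvALoop profondeurs parents pvFuelA [src] [src] src src 0 = _
    rw [show pvFuelA = (2^32+1)+1 by norm_num [pvFuelA]]
    rw [pvALoop_stop]
    simp [min_power_kruskal_alt]
  rcases hPre with heq | ⟨hndP, hndR, hGood, hRootU, ⟨qs, hqsm, hqs1⟩, ⟨qd, hqdm, hqd1⟩⟩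
  · exact absurd heq hsd
  -- lookup-level tree facts
  have hG1 : ∀ x d, pvProf profondeurs x = some d → 0 ≤ d :=
    fun x d h => (hGood _ (pvProf_mem h)).1
  have hG2 : ∀ x d, pvProf profondeurs x = some d → 0 < d →
      ∃ y pw d', pvPar parents x = some (y, pw) ∧ pvProf profondeurs y = some d' ∧ d' < d := by
    intro x d h hpos
    obtain ⟨r, hrm, hr1, q', hq'm, hq'1, hq'lt⟩ := (hGood _ (pvProf_mem h)).2 hpos
    refine ⟨r.2.1, r.2.2, q'.2, ?_, ?_, hq'lt⟩
    · have hre : r = (x, r.2) := by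
        obtain ⟨r1, r2⟩ := r; simp only at hr1 ⊢; simp [hr1]
      exact pvPar_of_mem hndR (hre ▸ hrm)
    · have hqe : q' = (r.2.1, q'.2) := by
        obtain ⟨a1, a2⟩ := q'; simp only at hq'1 ⊢; simp [hq'1]
      exact pvProf_of_mem hndP (hqe ▸ hq'm)
  have hG3 : ∀ x y, pvProf profondeurs x = some 0 → pvProf profondeurs y = some 0 → x = y := by
    intro x y hx hy
    exact hRootU (x, 0) (pvProf_mem hx) (y, 0) (pvProf_mem hy) rfl rfl
  -- the depths of src and dest, bounded by the domain
  have hDomP : ∀ q ∈ profondeurs, q.2 ≤ 2147483648 := by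
    intro q hq
    simp only [Dom_min_power_kruskal, Bool.and_eq_true, List.all_eq_true] at hDom
    have := hDom.1.1.1 q hq
    simp only [pvDomInt, decide_eq_true_eq] at this
    exact this.2.2
  have hps : pvProf profondeurs src = some qs.2 :=
    pvProf_of_mem hndP (by
      rwa [show (src, qs.2) = qs by obtain ⟨a1, a2⟩ := qs; simp only at hqs1 ⊢; simp [hqs1]])
  have hpd : pvProf profondeurs dest = some qd.2 :=
    pvProf_of_mem hndP (by
      rwa [show (dest, qd.2) = qd by obtain ⟨a1, a2⟩ := qd; simp only at hqd1 ⊢; simp [hqd1]])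
  have hbs : qs.2 ≤ 2147483648 := hDomP qs hqsm
  have hbd : qd.2 ≤ 2147483648 := hDomP qd hqdm
  have hnns : 0 ≤ qs.2 := hG1 _ _ hps
  have hnnd : 0 ≤ qd.2 := hG1 _ _ hpd
  -- the two ancestor chains
  obtain ⟨S1, P1, hchS, hrecS⟩ := pvClimb_spec hG2 hG1 pvFuelB src qs.2 hps
    (by simp only [pvFuelB]; omega)
  obtain ⟨S2, P2, hchD, hrecD⟩ := pvClimb_spec hG2 hG1 pvFuelB dest qd.2 hpd
    (by simp only [pvFuelB]; omega)
  have hBclimbS := hrecS [src] []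
  have hBclimbD := hrecD [dest] []
  simp only [List.cons_append, List.nil_append] at hBclimbS hBclimbD
  -- the LCA: first node of dest's chain that lies in src's chain
  have hfindSome : (dest :: S2).findIdx?
      (fun v => PySem.Set.contains (PySem.Set.ofList (src :: S1)) v) ≠ none := by
    intro hnone
    obtain ⟨r, hrS, hr0⟩ := pvChain_root_mem hchS
    obtain ⟨r2, hrD, hr20⟩ := pvChain_root_mem hchD
    have hrr : r2 = r := hG3 r2 r hr20 hr0
    have h2 := List.findIdx?_eq_none_iff.1 hnone r2 hrD
    rw [hrr] at h2
    rw [Bool.eq_false_iff] at h2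
    apply h2
    simp only [PySem.Set.contains_iff, PySem.Set.mem_ofList]
    exact hrS
  obtain ⟨j, hfind⟩ := Option.ne_none_iff_exists'.1 hfindSome
  obtain ⟨hjlt, hpj, hjmin'⟩ := List.findIdx?_eq_some_iff_getElem.1 hfind
  set c := (dest :: S2)[j] with hcdef
  have hcSa : c ∈ (src :: S1) := by
    simpa [PySem.Set.contains_iff, PySem.Set.mem_ofList] using hpj
  have hidxne : PySem.List.index? (src :: S1) c ≠ none :=
    fun h => ((PySem.List.index?_eq_none_iff _ _).1 h) hcSa
  obtain ⟨i, hidx⟩ := Option.ne_none_iff_exists'.1 hidxne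
  obtain ⟨hilt, hSaieq, hprev⟩ := PySem.List.getElem_of_index?_eq_some hidx
  -- hypotheses of the central lemma
  have hSai : (src :: S1)[i]? = some c := by
    rw [List.getElem?_eq_getElem hilt, hSaieq]
  have hSbj : (dest :: S2)[j]? = some c := by
    rw [List.getElem?_eq_getElem hjlt]
  have hjmin : ∀ k, k < j → ∀ v, (dest :: S2)[k]? = some v → v ∉ (src :: S1) := by
    intro k hk v hv hvin
    have hklt : k < (dest :: S2).length := lt_trans hk hjlt
    rw [List.getElem?_eq_getElem hklt] at hv
    injection hv with hv
    apply hjmin' k hk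
    simp [PySem.Set.mem_ofList, hv, hvin]
  have himin : ∀ k, k < i → (src :: S1)[k]? ≠ some c := by
    intro k hk h
    have hklt : k < (src :: S1).length := lt_trans hk hilt
    rw [List.getElem?_eq_getElem hklt] at h
    injection h with h
    exact hprev k hk h
  have hlenS : (src :: S1).length ≤ qs.2.toNat + 1 := pvChain_len hchS hps
  have hlenD : (dest :: S2).length ≤ qd.2.toNat + 1 := pvChain_len hchD hpd
  have hfuel : i + j < pvFuelA := by
    simp only [pvFuelA]
    have h1 : i < (src :: S1).length := hilt
    have h2 : j < (dest :: S2).length := hjlt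
    omega
  have hmain := pvMain hG3 pvFuelA src dest (src :: S1) P1 (dest :: S2) P2 i j c
    hchS hchD hSai hSbj hjmin himin hfuel [] [] 0
  simp only [List.nil_append] at hmain
  -- assemble both sides
  show pvALoop profondeurs parents pvFuelA [src] [dest] src dest 0 = _
  rw [hmain]
  simp only [min_power_kruskal_alt, if_neg hsd, hBclimbS, hBclimbD]
  rw [hfind]
  dsimp only
  have hgetD : (dest :: S2).getD j 0 = c := by
    rw [List.getD_eq_getElem?_getD, List.getElem?_eq_getElem hjlt]; rfl
  rw [hgetD, hidx]
  dsimp only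
  rw [PySem.List.max?_id_cons]
  refine Prod.ext ?_ ?_
  · -- the path: move the single copy of the LCA across the two slices
    have htS : (src :: S1).take (i+1) = (src :: S1).take i ++ [c] := by
      rw [List.take_add_one, hSai]; rfl
    have htD : (dest :: S2).take (j+1) = (dest :: S2).take j ++ [c] := by
      rw [List.take_add_one, hSbj]; rfl
    simp [htS, htD]
  · rfl
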